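-- pv_equiv track=rewrite | github.com/thomasschafer/puzzles | Jane_Street_puzzles/Its_Symmetric_2_solution.py | sum_of_squares_of_connected_unshaded_areas
-- ===== SOURCE A (Python) =====
-- from typing import List, Tuple
--
-- def area_of_connected_unshaded_area(arr: List[List[int]], i: int, j: int) -> int:
--     if i < 0 or i >= len(arr) or j < 0 or j >= len(arr[0]) or arr[i][j] != 0:
--         return 0
--     arr[i][j] = 1
--     return (
--         1 +
--         area_of_connected_unshaded_area(arr, i+1, j) +
--         area_of_connected_unshaded_area(arr, i, j+1) +
--         area_of_connected_unshaded_area(arr, i-1, j) +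
--         area_of_connected_unshaded_area(arr, i, j-1)
--     )
--
-- def sum_of_squares_of_connected_unshaded_areas(arr: List[List[int]]) -> int:
--     arr_copy = [row.copy() for row in arr]
--     total_sum = 0
--     for i in range(len(arr_copy)):
--         for j in range(len(arr_copy[0])):
--             if arr_copy[i][j] == 0:
--                 total_sum += area_of_connected_unshaded_area(arr_copy, i, j)**2
--     return total_sum
-- ===== SOURCE B (Python) =====
-- def sum_of_squares_of_connected_unshaded_areas(arr):
--     grid = [list(row) for row in arr]
--     total = 0
--     for i in range(len(grid)):
--         for j in range(len(grid[0])):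
--             if grid[i][j] == 0:
--                 size = 0
--                 stack = [(i, j)]
--                 while stack:
--                     r, c = stack.pop()
--                     if 0 <= r < len(grid) and 0 <= c < len(grid[0]) and grid[r][c] == 0:
--                         grid[r][c] = 1
--                         size += 1
--                         stack.extend(((r, c - 1), (r - 1, c), (r, c + 1), (r + 1, c)))
--                 total += size * size
--     return total
-- ===== Notes on version B (the rewrite author's own statement) =====
-- stated objective: alternative
-- what changed: replaces the recursive four-way flood fill (mutual recursion threading the mutated grid) by an iterative explicit-stack flood fill with a while loop, avoiding Python's recursion depth limit on large components
import Mathlib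
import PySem

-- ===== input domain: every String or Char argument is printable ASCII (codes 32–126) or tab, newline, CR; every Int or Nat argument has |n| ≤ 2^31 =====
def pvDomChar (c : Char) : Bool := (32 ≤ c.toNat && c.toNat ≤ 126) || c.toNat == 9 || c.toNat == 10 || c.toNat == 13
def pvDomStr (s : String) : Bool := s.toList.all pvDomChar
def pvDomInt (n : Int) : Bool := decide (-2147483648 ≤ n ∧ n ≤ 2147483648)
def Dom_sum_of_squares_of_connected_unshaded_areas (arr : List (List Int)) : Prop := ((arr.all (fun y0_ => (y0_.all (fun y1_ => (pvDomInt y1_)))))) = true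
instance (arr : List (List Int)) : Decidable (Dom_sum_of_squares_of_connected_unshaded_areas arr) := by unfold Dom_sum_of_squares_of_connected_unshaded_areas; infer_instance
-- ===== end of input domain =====

-- B replaces A's recursive four-way flood fill by an iterative explicit-stack flood fill (alternative
-- decomposition, same cost). A only mutates a local copy of its argument, so no side effect is at stake.

-- number of 0-cells of the grid (termination measure / fuel bound shared by both ports)
def pvZeros (g : List (List Int)) : Nat := (g.map (fun row => row.count 0)).sum

-- arr[i][j] = 1 (functional update)
def pvMark (g : List (List Int)) (i j : Nat) : List (List Int) :=
  g.set i ((g.getD i []).set j 1)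

-- used by pvFlood's decreasing_by, so it must precede it
theorem pvCount_set_lt {row : List Int} {j : Nat} (h : row[j]? = some 0) :
    (row.set j 1).count 0 < row.count 0 := by
  induction row generalizing j with
  | nil => simp at h
  | cons x xs ih =>
    cases j with
    | zero =>
      simp only [List.getElem?_cons_zero, Option.some.injEq] at h
      subst h
      simp
    | succ j =>
      simp only [List.getElem?_cons_succ] at h
      have := ih h
      simp only [List.set_cons_succ, List.count_cons]
      omega

theorem pvZeros_mark_lt {g : List (List Int)} {i j : Nat}
    (h : (g[i]?).bind (fun row => row[j]?) = some 0) :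
    pvZeros (pvMark g i j) < pvZeros g := by
  induction g generalizing i with
  | nil => simp at h
  | cons row tl ih =>
    cases i with
    | zero =>
      simp only [List.getElem?_cons_zero, Option.bind_some] at h
      simp only [pvMark, pvZeros, List.getD_cons_zero, List.set_cons_zero, List.map, List.sum_cons]
      have := pvCount_set_lt h
      omega
    | succ i =>
      simp only [List.getElem?_cons_succ] at h
      have := ih h
      simp only [pvMark, pvZeros, List.getD_cons_succ, List.set_cons_succ, List.map,
        List.sum_cons] at *
      omega

-- ===== PORT A =====
-- Python's single `if c1 or c2 … or arr[i][j] != 0: return 0` is transliterated as two nested ifs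
-- (identical short-circuit behaviour); the fuel argument only makes the nested recursion total:
-- each recursive level marks a distinct 0-cell, so `total cells + 1` fuel is never exhausted.
def pvArea : Nat → List (List Int) → Int → Int → Int × List (List Int)
  | 0, g, _, _ => (0, g)
  | f+1, g, i, j =>
    if i < 0 ∨ (g.length : Int) ≤ i ∨ j < 0 ∨ ((g.headD []).length : Int) ≤ j then (0, g)
    else if (g[i.toNat]?).bind (fun row => row[j.toNat]?) ≠ some 0 then (0, g)
    else
      let g1 := pvMark g i.toNat j.toNat
      let a := pvArea f g1 (i+1) j
      let b := pvArea f a.2 i (j+1)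
      let c := pvArea f b.2 (i-1) j
      let d := pvArea f c.2 i (j-1)
      (1 + a.1 + b.1 + c.1 + d.1, d.2)

def pvScanA (F : Nat) (i : Nat) (st : List (List Int) × Int) (j : Nat) : List (List Int) × Int :=
  if (st.1[i]?).bind (fun row => row[j]?) = some 0 then
    let r := pvArea F st.1 (i : Int) (j : Int)
    (r.2, st.2 + r.1 * r.1)
  else st

def sum_of_squares_of_connected_unshaded_areas (arr : List (List Int)) : Int :=
  let F := (arr.map List.length).sum + 1
  ((List.range arr.length).foldl
    (fun st i => (List.range (st.1.headD []).length).foldl (pvScanA F i) st)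
    (arr, 0)).2

-- ===== PORT B =====
-- iterative flood fill: stack head = Python's end of list (`pop` = take head, `extend` = push)
def pvFlood (g : List (List Int)) (stack : List (Int × Int)) (size : Int) : Int × List (List Int) :=
  match stack with
  | [] => (size, g)
  | (r, c) :: rest =>
    if h : 0 ≤ r ∧ r < (g.length : Int) ∧ 0 ≤ c ∧ c < ((g.headD []).length : Int) ∧
        (g[r.toNat]?).bind (fun row => row[c.toNat]?) = some 0 then
      pvFlood (pvMark g r.toNat c.toNat)
        ((r+1, c) :: (r, c+1) :: (r-1, c) :: (r, c-1) :: rest) (size + 1)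
    else pvFlood g rest size
  termination_by (pvZeros g, stack.length)
  decreasing_by
    · exact Prod.Lex.left _ _ (pvZeros_mark_lt h.2.2.2.2)
    · exact Prod.Lex.right _ (by simp)

def pvScanB (i : Nat) (st : List (List Int) × Int) (j : Nat) : List (List Int) × Int :=
  if (st.1[i]?).bind (fun row => row[j]?) = some 0 then
    let s := pvFlood st.1 [((i : Int), (j : Int))] 0
    (s.2, st.2 + s.1 * s.1)
  else st

def sum_of_squares_of_connected_unshaded_areas_alt (arr : List (List Int)) : Int :=
  ((List.range arr.length).foldl
    (fun st i => (List.range (st.1.headD []).length).foldl (pvScanB i) st)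
    (arr, 0)).2

-- ===== PRECONDITION & SPEC =====
-- Pre_ excludes ragged grids in which some row is shorter than the first row: on those Python A
-- raises IndexError (and Python B raises the same IndexError); on everything else A returns.
def Pre_sum_of_squares_of_connected_unshaded_areas (arr : List (List Int)) : Prop :=
  ∀ row ∈ arr, (arr.headD []).length ≤ row.length
instance (arr : List (List Int)) : Decidable (Pre_sum_of_squares_of_connected_unshaded_areas arr) := by
  unfold Pre_sum_of_squares_of_connected_unshaded_areas; infer_instance

def pvWitness_sum_of_squares_of_connected_unshaded_areas : List (List Int) := [[0, 1], [0, 0]]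

def Spec_sum_of_squares_of_connected_unshaded_areas (arr : List (List Int)) (out : Int) : Prop := out = sum_of_squares_of_connected_unshaded_areas_alt arr
instance (arr : List (List Int)) (out : Int) : Decidable (Spec_sum_of_squares_of_connected_unshaded_areas arr out) := by unfold Spec_sum_of_squares_of_connected_unshaded_areas; infer_instance

-- ===== CLAIM (what is proved, stated in full; the proofs are below) =====
def Claim_equal_sum_of_squares_of_connected_unshaded_areas : Prop := ∀ (arr : List (List Int)), Dom_sum_of_squares_of_connected_unshaded_areas arr → Pre_sum_of_squares_of_connected_unshaded_areas arr → Spec_sum_of_squares_of_connected_unshaded_areas arr (sum_of_squares_of_connected_unshaded_areas arr)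

-- ===== LEMMAS AND PROOFS =====

theorem pvArea_zeros_le : ∀ (f : Nat) (g : List (List Int)) (i j : Int),
    pvZeros (pvArea f g i j).2 ≤ pvZeros g := by
  intro f
  induction f with
  | zero => intro g i j; exact le_refl _
  | succ f ih =>
    intro g i j
    rw [pvArea]
    split
    · exact le_refl _
    · split
      · exact le_refl _
      · rename_i h1 h2
        have hm := pvZeros_mark_lt (not_not.mp h2)
        have ha := ih (pvMark g i.toNat j.toNat) (i+1) j
        have hb := ih (pvArea f (pvMark g i.toNat j.toNat) (i+1) j).2 i (j+1)
        have hc := ih (pvArea f (pvArea f (pvMark g i.toNat j.toNat) (i+1) j).2 i (j+1)).2 (i-1) j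
        have hd := ih (pvArea f (pvArea f (pvArea f (pvMark g i.toNat j.toNat) (i+1) j).2 i (j+1)).2 (i-1) j).2 i (j-1)
        show pvZeros (pvArea f (pvArea f (pvArea f (pvArea f (pvMark g i.toNat j.toNat) (i+1) j).2 i (j+1)).2 (i-1) j).2 i (j-1)).2 ≤ pvZeros g
        omega

theorem pvFlood_sim : ∀ (f : Nat) (g : List (List Int)) (r c : Int)
    (rest : List (Int × Int)) (size : Int), pvZeros g < f →
    pvFlood g ((r, c) :: rest) size
      = pvFlood (pvArea f g r c).2 rest (size + (pvArea f g r c).1) := by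
  intro f
  induction f with
  | zero => intro g r c rest size h; exact absurd h (Nat.not_lt_zero _)
  | succ f ih =>
    intro g r c rest size h
    by_cases hc : 0 ≤ r ∧ r < (g.length : Int) ∧ 0 ≤ c ∧ c < ((g.headD []).length : Int) ∧
        (g[r.toNat]?).bind (fun row => row[c.toNat]?) = some 0
    · rw [pvFlood, dif_pos hc]
      conv_rhs => rw [pvArea]
      rw [if_neg (by push Not; exact ⟨hc.1, hc.2.1, hc.2.2.1, hc.2.2.2.1⟩),
        if_neg (not_not.mpr hc.2.2.2.2)]
      have hm := pvZeros_mark_lt hc.2.2.2.2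
      have za := pvArea_zeros_le f (pvMark g r.toNat c.toNat) (r+1) c
      have zb := pvArea_zeros_le f (pvArea f (pvMark g r.toNat c.toNat) (r+1) c).2 r (c+1)
      have zc := pvArea_zeros_le f (pvArea f (pvArea f (pvMark g r.toNat c.toNat) (r+1) c).2 r (c+1)).2 (r-1) c
      rw [ih (pvMark g r.toNat c.toNat) (r+1) c _ (size+1) (by omega)]
      rw [ih _ r (c+1) _ _ (by omega)]
      rw [ih _ (r-1) c _ _ (by omega)]
      rw [ih _ r (c-1) _ _ (by omega)]
      show pvFlood (pvArea f (pvArea f (pvArea f (pvArea f (pvMark g r.toNat c.toNat) (r+1) c).2 r (c+1)).2 (r-1) c).2 r (c-1)).2 rest _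
        = pvFlood (pvArea f (pvArea f (pvArea f (pvArea f (pvMark g r.toNat c.toNat) (r+1) c).2 r (c+1)).2 (r-1) c).2 r (c-1)).2 rest _
      congr 1
      ring
    · rw [pvFlood, dif_neg hc]
      have hA : pvArea (f+1) g r c = (0, g) := by
        rw [pvArea]
        by_cases h1 : r < 0 ∨ (g.length : Int) ≤ r ∨ c < 0 ∨ ((g.headD []).length : Int) ≤ c
        · rw [if_pos h1]
        · rw [if_neg h1, if_pos]
          push Not at h1
          intro hcell
          exact hc ⟨h1.1, h1.2.1, h1.2.2.1, h1.2.2.2, hcell⟩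
      rw [hA]
      simp

theorem pvFlood_area (f : Nat) (g : List (List Int)) (r c : Int) (h : pvZeros g < f) :
    pvFlood g [(r, c)] 0 = pvArea f g r c := by
  rw [pvFlood_sim f g r c [] 0 h, pvFlood]
  simp

theorem pvScan_eq (F i : Nat) (st : List (List Int) × Int) (j : Nat) (h : pvZeros st.1 < F) :
    pvScanA F i st j = pvScanB i st j ∧ pvZeros (pvScanA F i st j).1 < F := by
  constructor
  · unfold pvScanA pvScanB
    split
    · rw [pvFlood_area F st.1 (i : Int) (j : Int) h]
    · rfl
  · unfold pvScanA
    split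
    · exact Nat.lt_of_le_of_lt (pvArea_zeros_le F st.1 (i : Int) (j : Int)) h
    · exact h

theorem pvInner_eq (F i : Nat) : ∀ (js : List Nat) (st : List (List Int) × Int),
    pvZeros st.1 < F →
    List.foldl (pvScanA F i) st js = List.foldl (pvScanB i) st js ∧
      pvZeros (List.foldl (pvScanA F i) st js).1 < F := by
  intro js
  induction js with
  | nil => exact fun st h => ⟨rfl, h⟩
  | cons j js ih =>
    intro st h
    obtain ⟨he, hz⟩ := pvScan_eq F i st j h
    simp only [List.foldl_cons, he]
    obtain ⟨he2, hz2⟩ := ih _ (he ▸ hz)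
    exact ⟨he2, he ▸ hz2⟩

theorem pvOuter_eq (F : Nat) : ∀ (is : List Nat) (st : List (List Int) × Int),
    pvZeros st.1 < F →
    List.foldl (fun st i => (List.range (st.1.headD []).length).foldl (pvScanA F i) st) st is
      = List.foldl (fun st i => (List.range (st.1.headD []).length).foldl (pvScanB i) st) st is := by
  intro is
  induction is with
  | nil => intro st _; rfl
  | cons i is ih =>
    intro st h
    obtain ⟨he, hz⟩ := pvInner_eq F i (List.range (st.1.headD []).length) st h
    simp only [List.foldl_cons]
    rw [← he]
    exact ih _ hz

theorem pvZeros_le_cells (arr : List (List Int)) : pvZeros arr ≤ (arr.map List.length).sum := by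
  induction arr with
  | nil => simp [pvZeros]
  | cons row tl ih =>
    simp only [pvZeros, List.map, List.sum_cons] at *
    have := List.count_le_length (l := row) (a := (0 : Int))
    omega

-- ===== VERDICT (by name: the statement is the Claim_ definition above) =====
theorem sum_of_squares_of_connected_unshaded_areas_spec : Claim_equal_sum_of_squares_of_connected_unshaded_areas := by
  intro arr _ _
  unfold Spec_sum_of_squares_of_connected_unshaded_areas
  unfold sum_of_squares_of_connected_unshaded_areas sum_of_squares_of_connected_unshaded_areas_alt
  have h : pvZeros arr < (arr.map List.length).sum + 1 :=
    Nat.lt_succ_of_le (pvZeros_le_cells arr)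
  exact congrArg Prod.snd
    (pvOuter_eq ((arr.map List.length).sum + 1) (List.range arr.length) (arr, 0) h)
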